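-- pv_equiv track=rewrite | github.com/olivia-clarkeedwards/hacker-rank-practice | raiseCookieSweetness.py | sweeten
-- ===== SOURCE A (Python) =====
-- import heapq
--
-- def sweeten(min_sweetness, cookies, count = 0):
--     heapq.heapify(cookies)
--
--     while cookies[0] < min_sweetness:
--         if len(cookies) == 1:
--             return -1
--         least_sweet = heapq.heappop(cookies)
--         second_least_sweet = heapq.heappop(cookies)
--         heapq.heappush(cookies, least_sweet + (2 * second_least_sweet))
--         count += 1
--
--     return count
-- ===== SOURCE B (Python) =====
-- from collections import deque
--
-- def sweeten(min_sweetness, cookies, count=0):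
--     # Two-queue technique: sort once, then merge a queue of untouched sorted
--     # originals with a FIFO queue of combined values (which leave the process
--     # in nondecreasing order), so no priority queue is needed.
--     # Note: unlike the original, this does not mutate `cookies` in place.
--     originals = deque(sorted(cookies))
--     combined = deque()
--
--     def smallest():
--         if combined and (not originals or combined[0] <= originals[0]):
--             return combined[0]
--         return originals[0]  # IndexError on empty input, like cookies[0]
--
--     def pop_smallest():
--         if combined and (not originals or combined[0] <= originals[0]):
--             return combined.popleft()
--         return originals.popleft()
--
--     while smallest() < min_sweetness:
--         if len(originals) + len(combined) == 1:
--             return -1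
--         a = pop_smallest()
--         b = pop_smallest()
--         combined.append(a + 2 * b)
--         count += 1
--     return count
-- ===== Notes on version B (the rewrite author's own statement) =====
-- stated objective: faster
-- what changed: Replaces the binary heap with the two-queue (Huffman-merge) technique: sort once, then repeatedly take the smaller front of the sorted-originals queue and a FIFO queue of combined values, appending each combined cookie to the FIFO; correctness rests on the proved invariant that combined values enter the FIFO in nondecreasing order, so each combine step is O(1) with no per-operation reheapification.
import Mathlib
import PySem

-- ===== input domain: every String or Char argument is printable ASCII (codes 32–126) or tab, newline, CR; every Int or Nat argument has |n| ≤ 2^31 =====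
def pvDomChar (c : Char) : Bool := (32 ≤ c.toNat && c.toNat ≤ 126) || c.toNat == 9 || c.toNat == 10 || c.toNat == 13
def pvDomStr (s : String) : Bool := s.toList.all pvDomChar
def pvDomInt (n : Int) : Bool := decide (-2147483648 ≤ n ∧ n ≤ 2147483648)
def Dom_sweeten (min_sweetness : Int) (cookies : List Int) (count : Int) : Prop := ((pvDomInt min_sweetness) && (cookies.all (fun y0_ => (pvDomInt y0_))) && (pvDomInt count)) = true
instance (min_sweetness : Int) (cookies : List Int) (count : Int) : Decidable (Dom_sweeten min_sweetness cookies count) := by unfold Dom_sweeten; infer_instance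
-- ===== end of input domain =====

-- B replaces the heap with the two-queue technique (sorted originals + FIFO of combined
-- values); A mutates `cookies` in place (heapify) while B does not — the equivalence
-- proved here is about the RETURN value only.

-- ===== PORT A =====
-- A's heap is modelled as the multiset it holds: the heapq calls are ported by their
-- documented semantics (heap[0] / heappop = the smallest element, heappush = add an
-- element, heapify = build the heap from the list), which is exact for the return
-- value since the elements are ints and only pops and heap[0] are observed.
def sweetenLoopA (ms : Int) (heap : List Int) (count : Int) : Int :=
  match hm : PySem.List.min? heap (fun x => x) with
  | none => 0  -- cookies[0] on an empty heap raises IndexError; excluded by Pre_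
  | some a =>
    if a < ms then
      if heap.length = 1 then -1
      else
        let h1 := heap.erase a          -- heappop: remove the smallest
        match hm2 : PySem.List.min? h1 (fun x => x) with
        | none => 0                      -- unreachable: heap had ≥ 2 elements
        | some b =>
          sweetenLoopA ms ((h1.erase b) ++ [a + 2 * b]) (count + 1)  -- heappop + heappush
    else count
  termination_by heap.length
  decreasing_by
    have ha : a ∈ heap := PySem.List.min?_mem hm
    have hb : b ∈ heap.erase a := PySem.List.min?_mem hm2
    have l1 : (heap.erase a).length = heap.length - 1 := List.length_erase_of_mem ha
    have l2 : ((heap.erase a).erase b).length = (heap.erase a).length - 1 :=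
      List.length_erase_of_mem hb
    have : heap.length ≥ 1 := List.length_pos_of_mem ha
    have : (heap.erase a).length ≥ 1 := List.length_pos_of_mem hb
    simp only [List.length_append, List.length_cons, List.length_nil, h1] at *
    omega

def sweeten (min_sweetness : Int) (cookies : List Int) (count : Int) : Int :=
  sweetenLoopA min_sweetness cookies count

-- ===== PORT B =====
-- Source B's pop_smallest(): take the front of `combined` when it is ≤ the front of
-- `originals` (or originals is exhausted), else the front of `originals`; the two
-- deques are the two lists, popleft = taking the tail.  none = IndexError on empty.
def popSmallest (orig comb : List Int) : Option (Int × List Int × List Int) :=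
  match comb with
  | c :: cs =>
    match orig with
    | [] => some (c, [], cs)
    | o :: os => if c ≤ o then some (c, orig, cs) else some (o, os, comb)
  | [] =>
    match orig with
    | [] => none
    | o :: os => some (o, os, [])

-- Source B's smallest(): the value pop_smallest() would return, without removing it
def peekSmallest (orig comb : List Int) : Option Int :=
  (popSmallest orig comb).map (fun r => r.1)

-- used by the loop's decreasing_by, so it lives above it
lemma popSmallest_length {orig comb : List Int} {x : Int} {o' c' : List Int}
    (h : popSmallest orig comb = some (x, o', c')) :
    o'.length + c'.length + 1 = orig.length + comb.length := by
  cases comb with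
  | nil => cases orig with
    | nil => simp [popSmallest] at h
    | cons o os => simp [popSmallest] at h; obtain ⟨_, h2, h3⟩ := h; subst h2; subst h3; simp
  | cons c cs => cases orig with
    | nil => simp [popSmallest] at h; obtain ⟨_, h2, h3⟩ := h; subst h2; subst h3; simp
    | cons o os =>
      simp only [popSmallest] at h
      split at h <;> simp_all <;> omega

def sweetenLoopB (ms : Int) (orig comb : List Int) (count : Int) : Int :=
  match peekSmallest orig comb with
  | none => 0  -- smallest() on empty input raises IndexError; excluded by Pre_
  | some m =>
    if m < ms then
      if orig.length + comb.length = 1 then -1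
      else
        match h1 : popSmallest orig comb with
        | none => 0  -- unreachable: the pool is nonempty
        | some (a, o1, c1) =>
          match h2 : popSmallest o1 c1 with
          | none => 0  -- unreachable: the pool had ≥ 2 elements
          | some (b, o2, c2) =>
            sweetenLoopB ms o2 (c2 ++ [a + 2 * b]) (count + 1)
    else count
  termination_by orig.length + comb.length
  decreasing_by
    have e1 := popSmallest_length h1
    have e2 := popSmallest_length h2
    simp only [List.length_append, List.length_cons, List.length_nil]
    omega

def sweeten_alt (min_sweetness : Int) (cookies : List Int) (count : Int) : Int :=
  sweetenLoopB min_sweetness (PySem.List.sorted cookies (fun x => x)) [] count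

-- ===== PRECONDITION & SPEC =====
-- Pre_ excludes only the empty cookies list, on which both A and B raise IndexError.
def Pre_sweeten (min_sweetness : Int) (cookies : List Int) (count : Int) : Prop :=
  cookies ≠ []
instance (min_sweetness : Int) (cookies : List Int) (count : Int) : Decidable (Pre_sweeten min_sweetness cookies count) := by unfold Pre_sweeten; infer_instance
def pvWitness_sweeten : Int × List Int × Int := (5, [1, 2, 9], 0)

def Spec_sweeten (min_sweetness : Int) (cookies : List Int) (count : Int) (out : Int) : Prop := out = sweeten_alt min_sweetness cookies count
instance (min_sweetness : Int) (cookies : List Int) (count : Int) (out : Int) : Decidable (Spec_sweeten min_sweetness cookies count out) := by unfold Spec_sweeten; infer_instance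

-- ===== CLAIM (what is proved, stated in full; the proofs are below) =====
def Claim_equal_sweeten : Prop := ∀ (min_sweetness : Int) (cookies : List Int) (count : Int), Dom_sweeten min_sweetness cookies count → Pre_sweeten min_sweetness cookies count → Spec_sweeten min_sweetness cookies count (sweeten min_sweetness cookies count)

-- ===== LEMMAS AND PROOFS =====

-- The FIFO invariant that makes the two-queue technique exact: any queued combined
-- value that is ≥ the pool's second minimum is ≤ the value combined next.
def CombBound (pool comb : List Int) : Prop :=
  ∀ u ∈ comb, ∀ a b : Int, PySem.List.min? pool (fun x => x) = some a →
    PySem.List.min? (pool.erase a) (fun x => x) = some b → b ≤ u → u ≤ a + 2 * b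

lemma popSmallest_some {orig comb : List Int} (h : orig ++ comb ≠ []) :
    ∃ x o' c', popSmallest orig comb = some (x, o', c') := by
  cases comb with
  | nil => cases orig with
    | nil => simp at h
    | cons o os => exact ⟨o, os, [], rfl⟩
  | cons c cs => cases orig with
    | nil => exact ⟨c, [], cs, rfl⟩
    | cons o os =>
      by_cases hco : c ≤ o
      · exact ⟨c, o :: os, cs, by simp [popSmallest, hco]⟩
      · exact ⟨o, os, c :: cs, by simp [popSmallest, hco]⟩

-- each output list is the corresponding input or its tail
lemma popSmallest_parts {orig comb : List Int} {x : Int} {o' c' : List Int}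
    (h : popSmallest orig comb = some (x, o', c')) :
    (o' = orig ∨ orig = x :: o') ∧ (c' = comb ∨ comb = x :: c') := by
  cases comb with
  | nil => cases orig with
    | nil => simp [popSmallest] at h
    | cons o os =>
      simp [popSmallest] at h
      obtain ⟨h1, h2, h3⟩ := h; subst h1; subst h2; subst h3
      exact ⟨Or.inr rfl, Or.inl rfl⟩
  | cons c cs => cases orig with
    | nil =>
      simp [popSmallest] at h
      obtain ⟨h1, h2, h3⟩ := h; subst h1; subst h2; subst h3
      exact ⟨Or.inl rfl, Or.inr rfl⟩
    | cons o os =>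
      simp only [popSmallest] at h
      by_cases hco : c ≤ o
      · rw [if_pos hco] at h
        simp only [Option.some.injEq, Prod.mk.injEq] at h
        obtain ⟨h1, h2, h3⟩ := h; subst h1; subst h2; subst h3
        exact ⟨Or.inl rfl, Or.inr rfl⟩
      · rw [if_neg hco] at h
        simp only [Option.some.injEq, Prod.mk.injEq] at h
        obtain ⟨h1, h2, h3⟩ := h; subst h1; subst h2; subst h3
        exact ⟨Or.inr rfl, Or.inl rfl⟩

lemma popSmallest_sorted_orig {orig comb : List Int} {x : Int} {o' c' : List Int}
    (hso : orig.Pairwise (· ≤ ·)) (h : popSmallest orig comb = some (x, o', c')) :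
    o'.Pairwise (· ≤ ·) := by
  rcases (popSmallest_parts h).1 with h1 | h1
  · subst h1; exact hso
  · rw [h1] at hso; exact (List.pairwise_cons.mp hso).2

lemma popSmallest_sorted_comb {orig comb : List Int} {x : Int} {o' c' : List Int}
    (hsc : comb.Pairwise (· ≤ ·)) (h : popSmallest orig comb = some (x, o', c')) :
    c'.Pairwise (· ≤ ·) := by
  rcases (popSmallest_parts h).2 with h1 | h1
  · subst h1; exact hsc
  · rw [h1] at hsc; exact (List.pairwise_cons.mp hsc).2

lemma popSmallest_comb_sub {orig comb : List Int} {x : Int} {o' c' : List Int}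
    (h : popSmallest orig comb = some (x, o', c')) : ∀ u ∈ c', u ∈ comb := by
  rcases (popSmallest_parts h).2 with h1 | h1
  · subst h1; exact fun u hu => hu
  · rw [h1]; exact fun u hu => List.mem_cons_of_mem _ hu

-- popSmallest removes its result from the pool (as a multiset)
lemma popSmallest_perm {orig comb : List Int} {x : Int} {o' c' : List Int}
    (h : popSmallest orig comb = some (x, o', c')) :
    (orig ++ comb).Perm (x :: (o' ++ c')) := by
  cases comb with
  | nil => cases orig with
    | nil => simp [popSmallest] at h
    | cons o os =>
      simp [popSmallest] at h
      obtain ⟨h1, h2, h3⟩ := h; subst h1; subst h2; subst h3; simp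
  | cons c cs => cases orig with
    | nil =>
      simp [popSmallest] at h
      obtain ⟨h1, h2, h3⟩ := h; subst h1; subst h2; subst h3; simp
    | cons o os =>
      simp only [popSmallest] at h
      by_cases hco : c ≤ o
      · rw [if_pos hco] at h
        simp only [Option.some.injEq, Prod.mk.injEq] at h
        obtain ⟨h1, h2, h3⟩ := h; subst h1; subst h2; subst h3
        exact List.perm_middle
      · rw [if_neg hco] at h
        simp only [Option.some.injEq, Prod.mk.injEq] at h
        obtain ⟨h1, h2, h3⟩ := h; subst h1; subst h2; subst h3
        simp

-- popSmallest returns a minimum of the pool when both lists are sorted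
lemma popSmallest_isMin {orig comb : List Int} {x : Int} {o' c' : List Int}
    (hso : orig.Pairwise (· ≤ ·)) (hsc : comb.Pairwise (· ≤ ·))
    (h : popSmallest orig comb = some (x, o', c')) :
    ∀ y ∈ orig ++ comb, x ≤ y := by
  intro y hy
  cases comb with
  | nil => cases orig with
    | nil => simp [popSmallest] at h
    | cons o os =>
      simp [popSmallest] at h
      obtain ⟨h1, _, _⟩ := h; subst h1
      simp at hy
      rcases hy with h | h
      · omega
      · exact List.rel_of_pairwise_cons hso h
  | cons c cs => cases orig with
    | nil =>
      simp [popSmallest] at h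
      obtain ⟨h1, _, _⟩ := h; subst h1
      simp at hy
      rcases hy with h | h
      · omega
      · exact List.rel_of_pairwise_cons hsc h
    | cons o os =>
      simp only [popSmallest] at h
      by_cases hco : c ≤ o
      · rw [if_pos hco] at h
        simp only [Option.some.injEq, Prod.mk.injEq] at h
        obtain ⟨h1, _, _⟩ := h; subst h1
        simp at hy
        rcases hy with h | h | h | h
        · omega
        · exact le_trans hco (List.rel_of_pairwise_cons hso h)
        · omega
        · exact List.rel_of_pairwise_cons hsc h
      · rw [if_neg hco] at h
        simp only [Option.some.injEq, Prod.mk.injEq] at h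
        obtain ⟨h1, _, _⟩ := h; subst h1
        simp at hy
        have hoc : o ≤ c := by omega
        rcases hy with h | h | h | h
        · omega
        · exact List.rel_of_pairwise_cons hso h
        · omega
        · exact le_trans hoc (List.rel_of_pairwise_cons hsc h)

-- the min? value of any permutation of the pool equals the popped value
lemma min?_value_eq {l pool : List Int} {a x : Int}
    (hp : l.Perm pool) (hm : PySem.List.min? l (fun v => v) = some a)
    (hx : x ∈ pool) (hmin : ∀ y ∈ pool, x ≤ y) : a = x := by
  have ha : a ∈ pool := hp.mem_iff.mp (PySem.List.min?_mem hm)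
  have h1 : x ≤ a := hmin a ha
  have h2 : a ≤ x := PySem.List.min?_isMin hm x (hp.mem_iff.mpr hx)
  omega

lemma min?_some_of_ne_nil {l : List Int} (h : l ≠ []) :
    ∃ a, PySem.List.min? l (fun v => v) = some a := by
  cases hm : PySem.List.min? l (fun v => v) with
  | none => exact absurd ((PySem.List.min?_eq_none_iff l (fun v => v)).mp hm) h
  | some a => exact ⟨a, rfl⟩

-- a combined value still queued after the two pops is ≤ the value just combined
lemma survivor_le {orig comb o1 c1 o2 c2 : List Int} {a b : Int}
    (hpop1 : popSmallest orig comb = some (a, o1, c1))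
    (hpop2 : popSmallest o1 c1 = some (b, o2, c2))
    (hso : orig.Pairwise (· ≤ ·)) (hsc : comb.Pairwise (· ≤ ·))
    (hcb : CombBound (orig ++ comb) comb) :
    ∀ u ∈ c2, u ≤ a + 2 * b := by
  intro u hu
  have hso1 := popSmallest_sorted_orig hso hpop1
  have hsc1 := popSmallest_sorted_comb hsc hpop1
  have hperm1 := popSmallest_perm hpop1
  have hperm2 := popSmallest_perm hpop2
  have hmin1 := popSmallest_isMin hso hsc hpop1
  have hmin2 := popSmallest_isMin hso1 hsc1 hpop2
  have hucomb : u ∈ comb :=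
    popSmallest_comb_sub hpop1 u (popSmallest_comb_sub hpop2 u hu)
  have hu12 : u ∈ o1 ++ c1 :=
    hperm2.mem_iff.mpr (List.mem_cons_of_mem _ (List.mem_append_right _ hu))
  have hub : b ≤ u := hmin2 u hu12
  -- a is the min? value of the pool
  have hpoolne : orig ++ comb ≠ [] := by
    intro hnil
    have := hperm1.length_eq
    simp [hnil] at this
  obtain ⟨a0, hma0⟩ := min?_some_of_ne_nil hpoolne
  have ha0 : a0 = a :=
    min?_value_eq (List.Perm.refl _) hma0 (hperm1.mem_iff.mpr List.mem_cons_self) hmin1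
  subst ha0
  -- b is the min? value of the pool minus a0
  have hpE : ((orig ++ comb).erase a0).Perm (o1 ++ c1) := by
    have := hperm1.erase a0
    simpa [List.erase_cons_head] using this
  have h12ne : o1 ++ c1 ≠ [] := by
    intro hnil
    rw [hnil] at hu12
    simp at hu12
  obtain ⟨b0, hmb0⟩ := min?_some_of_ne_nil (l := (orig ++ comb).erase a0) (by
    intro hnil
    rw [hnil] at hpE
    exact h12ne hpE.nil_eq.symm)
  have hb0 : b0 = b :=
    min?_value_eq hpE hmb0 (hperm2.mem_iff.mpr List.mem_cons_self) hmin2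
  subst hb0
  exact hcb u hucomb a0 b0 hma0 hmb0 hub

-- the FIFO invariant is maintained across one combine step
lemma combBound_next {orig comb o1 c1 o2 c2 : List Int} {a b : Int}
    (hpop1 : popSmallest orig comb = some (a, o1, c1))
    (hpop2 : popSmallest o1 c1 = some (b, o2, c2))
    (hso : orig.Pairwise (· ≤ ·)) (hsc : comb.Pairwise (· ≤ ·))
    (hcb : CombBound (orig ++ comb) comb) :
    CombBound (o2 ++ (c2 ++ [a + 2 * b])) (c2 ++ [a + 2 * b]) := by
  intro u hu a' b' hm1' hm2' hb'u
  have hso1 := popSmallest_sorted_orig hso hpop1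
  have hsc1 := popSmallest_sorted_comb hsc hpop1
  have hperm1 := popSmallest_perm hpop1
  have hperm2 := popSmallest_perm hpop2
  have hmin1 := popSmallest_isMin hso hsc hpop1
  have hmin2 := popSmallest_isMin hso1 hsc1 hpop2
  have hsurv := survivor_le hpop1 hpop2 hso hsc hcb
  have hab : a ≤ b :=
    hmin1 b (hperm1.mem_iff.mpr (List.mem_cons_of_mem _ (hperm2.mem_iff.mpr List.mem_cons_self)))
  have hsub12 : ∀ y, y ∈ o2 ++ c2 → y ∈ o1 ++ c1 := fun y hy =>
    hperm2.mem_iff.mpr (List.mem_cons_of_mem _ hy)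
  have F1 : ∀ y ∈ o2 ++ (c2 ++ [a + 2 * b]), y = a + 2 * b ∨ b ≤ y := by
    intro y hy
    simp only [List.mem_append, List.mem_singleton] at hy
    rcases hy with h | h | h
    · exact Or.inr (hmin2 y (hsub12 y (List.mem_append_left _ h)))
    · exact Or.inr (hmin2 y (hsub12 y (List.mem_append_right _ h)))
    · exact Or.inl h
  have ha'mem : a' ∈ o2 ++ (c2 ++ [a + 2 * b]) := PySem.List.min?_mem hm1'
  have ha'min : ∀ y ∈ o2 ++ (c2 ++ [a + 2 * b]), a' ≤ y := fun y hy =>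
    PySem.List.min?_isMin hm1' y hy
  have hb'mem : b' ∈ (o2 ++ (c2 ++ [a + 2 * b])).erase a' := PySem.List.min?_mem hm2'
  have hb'pool : b' ∈ o2 ++ (c2 ++ [a + 2 * b]) := List.mem_of_mem_erase hb'mem
  have ha'b' : a' ≤ b' := ha'min b' hb'pool
  simp only [List.mem_append, List.mem_singleton] at hu
  by_cases hba' : b ≤ a'
  · -- the two new minima are ≥ b ≥ a, so the new combined value dominates u
    rcases hu with hc2 | hv
    · have := hsurv u hc2
      omega
    · omega
  · -- a' < b forces a' to be the freshly combined value
    have ha'v : a' = a + 2 * b := by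
      rcases F1 a' ha'mem with h | h
      · exact h
      · omega
    rcases hu with hc2 | hv
    · -- survivors are ≥ b > a' = a+2b ≥ u: impossible, closes by omega
      have h1 := hsurv u hc2
      have h2 : b ≤ u := hmin2 u (hsub12 u (List.mem_append_right _ hc2))
      omega
    · -- u is the fresh value; b' is either ≥ b (contradiction) or a second copy
      -- of the fresh value, which cannot exist since all other elements are ≥ b
      subst hv
      rcases F1 b' hb'pool with hbv | hbb
      · -- b' = a+2b: but the pool minus a' = pool minus the only copy of a+2b
        have hpp : (o2 ++ (c2 ++ [a + 2 * b])).Perm ((a + 2 * b) :: (o2 ++ c2)) := by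
          have h1 : o2 ++ (c2 ++ [a + 2 * b]) = (o2 ++ c2) ++ [a + 2 * b] := by
            simp [List.append_assoc]
          rw [h1]
          exact List.perm_append_singleton _ _
        have herase : ((o2 ++ (c2 ++ [a + 2 * b])).erase a').Perm (o2 ++ c2) := by
          rw [ha'v]
          have := hpp.erase (a + 2 * b)
          simpa [List.erase_cons_head] using this
        have hb'2 : b' ∈ o2 ++ c2 := herase.mem_iff.mp hb'mem
        have : b ≤ b' := hmin2 b' (hsub12 b' hb'2)
        omega
      · omega

-- the core induction: A's multiset loop agrees with B's two-queue loop
lemma loop_eq (ms : Int) : ∀ (n : ℕ) (heap orig comb : List Int), heap.length ≤ n →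
    heap.Perm (orig ++ comb) → orig.Pairwise (· ≤ ·) → comb.Pairwise (· ≤ ·) →
    CombBound (orig ++ comb) comb →
    ∀ count, sweetenLoopA ms heap count = sweetenLoopB ms orig comb count := by
  intro n
  induction n with
  | zero =>
    intro heap orig comb hlen hp _ _ _ count
    have h1 : heap = [] := List.eq_nil_of_length_eq_zero (Nat.le_zero.mp hlen)
    subst h1
    have h2 : orig ++ comb = [] := hp.nil_eq.symm
    have ho : orig = [] := by cases orig <;> simp_all
    have hc : comb = [] := by simp_all
    subst ho; subst hc
    rw [sweetenLoopA, sweetenLoopB]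
    split
    · split
      · rfl
      · next m heqB => simp [peekSmallest, popSmallest] at heqB
    · next a heq => exact absurd (PySem.List.min?_mem heq) (List.not_mem_nil)
  | succ n ih =>
    intro heap orig comb hlen hp hso hsc hcb count
    by_cases hpool : orig ++ comb = []
    · have hh : heap = [] := by
        have := hp.length_eq
        rw [hpool] at this
        exact List.eq_nil_of_length_eq_zero (by simpa using this)
      subst hh
      have ho : orig = [] := by cases orig <;> simp_all
      have hc : comb = [] := by simp_all
      subst ho; subst hc
      rw [sweetenLoopA, sweetenLoopB]
      split
      · split
        · rfl
        · next m heqB => simp [peekSmallest, popSmallest] at heqB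
      · next a heq => exact absurd (PySem.List.min?_mem heq) (List.not_mem_nil)
    · obtain ⟨x, o1, c1, hpop1⟩ := popSmallest_some hpool
      have hperm1 := popSmallest_perm hpop1
      have hmin1 := popSmallest_isMin hso hsc hpop1
      have hxmem : x ∈ orig ++ comb := hperm1.mem_iff.mpr List.mem_cons_self
      have hheapne : heap ≠ [] := by
        intro h; subst h; exact hpool hp.nil_eq.symm
      obtain ⟨a0, hma0⟩ := min?_some_of_ne_nil hheapne
      have hax : a0 = x := min?_value_eq hp hma0 hxmem hmin1
      rw [hax] at hma0
      have hpeek : peekSmallest orig comb = some x := by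
        rw [peekSmallest, hpop1]; rfl
      rw [sweetenLoopA, sweetenLoopB]
      simp only [hpeek]
      split
      · next heq => rw [hma0] at heq; cases heq
      · next a' heq =>
        rw [hma0] at heq
        injection heq with ha'
        subst ha'
        have hleneq : heap.length = orig.length + comb.length := by
          simpa using hp.length_eq
        have h1len : orig.length + comb.length = (o1 ++ c1).length + 1 := by
          have := hperm1.length_eq
          simpa using this
        by_cases hlt : x < ms
        · rw [if_pos hlt, if_pos hlt]
          by_cases hone : heap.length = 1
          · rw [if_pos hone, if_pos (by omega)]
          · rw [if_neg hone, if_neg (by omega)]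
            have hxheap : x ∈ heap := PySem.List.min?_mem hma0
            have hge2 : 2 ≤ heap.length := by
              have := List.length_pos_of_mem hxheap
              omega
            have h12ne : o1 ++ c1 ≠ [] := by
              intro h
              rw [h] at h1len
              simp at h1len
              omega
            obtain ⟨y, o2, c2, hpop2⟩ := popSmallest_some h12ne
            have hso1 := popSmallest_sorted_orig hso hpop1
            have hsc1 := popSmallest_sorted_comb hsc hpop1
            have hperm2 := popSmallest_perm hpop2
            have hmin2 := popSmallest_isMin hso1 hsc1 hpop2
            have hpE : (heap.erase x).Perm (o1 ++ c1) := by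
              have := (hp.trans hperm1).erase x
              simpa [List.erase_cons_head] using this
            split
            · next heq2 =>
              have hnil : heap.erase x = [] :=
                (PySem.List.min?_eq_none_iff _ _).mp heq2
              rw [hnil] at hpE
              exact (h12ne hpE.nil_eq.symm).elim
            · next b heq2 =>
              have hby : b = y :=
                min?_value_eq hpE heq2 (hperm2.mem_iff.mpr List.mem_cons_self) hmin2
              subst hby
              split
              · next heqB1 => rw [hpop1] at heqB1; cases heqB1
              · next a1 o1' c1' heqB1 =>
                rw [hpop1] at heqB1
                simp only [Option.some.injEq, Prod.mk.injEq] at heqB1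
                obtain ⟨e1, e2, e3⟩ := heqB1
                subst e1; subst e2; subst e3
                split
                · next heqB2 => rw [hpop2] at heqB2; cases heqB2
                · next b1 o2' c2' heqB2 =>
                  rw [hpop2] at heqB2
                  simp only [Option.some.injEq, Prod.mk.injEq] at heqB2
                  obtain ⟨e1, e2, e3⟩ := heqB2
                  subst e1; subst e2; subst e3
                  have hpE2 : ((heap.erase x).erase b).Perm (o2 ++ c2) := by
                    have := (hpE.trans hperm2).erase b
                    simpa [List.erase_cons_head] using this
                  have hpnew : (((heap.erase x).erase b) ++ [x + 2 * b]).Perm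
                      (o2 ++ (c2 ++ [x + 2 * b])) := by
                    have h1 : o2 ++ (c2 ++ [x + 2 * b]) = (o2 ++ c2) ++ [x + 2 * b] := by
                      simp [List.append_assoc]
                    rw [h1]
                    exact hpE2.append_right _
                  have hbmem : b ∈ heap.erase x := PySem.List.min?_mem heq2
                  have hlnew : (((heap.erase x).erase b) ++ [x + 2 * b]).length ≤ n := by
                    have l1 := List.length_erase_of_mem hxheap
                    have l2 := List.length_erase_of_mem hbmem
                    simp only [List.length_append, List.length_cons, List.length_nil]
                    omega
                  have hso2 := popSmallest_sorted_orig hso1 hpop2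
                  have hsc2 := popSmallest_sorted_comb hsc1 hpop2
                  have hsurv := survivor_le hpop1 hpop2 hso hsc hcb
                  have hsc2' : (c2 ++ [x + 2 * b]).Pairwise (· ≤ ·) := by
                    refine List.pairwise_append.mpr ⟨hsc2, List.pairwise_singleton _ _, ?_⟩
                    intro u hu w hw
                    simp only [List.mem_singleton] at hw
                    subst hw
                    exact hsurv u hu
                  exact ih _ _ _ hlnew hpnew hso2 hsc2'
                    (combBound_next hpop1 hpop2 hso hsc hcb) _
        · rw [if_neg hlt, if_neg hlt]

-- ===== VERDICT (by name: the statement is the Claim_ definition above) =====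
theorem sweeten_spec : Claim_equal_sweeten := by
  intro ms cookies count _ _
  unfold Spec_sweeten sweeten sweeten_alt
  exact loop_eq ms cookies.length cookies (PySem.List.sorted cookies (fun x => x)) []
    le_rfl (by simpa using (PySem.List.sorted_perm cookies (fun x => x) false).symm)
    (PySem.List.sorted_pairwise cookies (fun x => x))
    List.Pairwise.nil (by intro u hu; simp at hu) count
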